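-- pv_equiv track=rewrite | github.com/eli-byers/JS_algos | Leetcode/LeetCode/32-longest-valid-parentheses.py | findSeeds
-- ===== SOURCE A (Python) =====
-- def findSeeds(s):
--     seeds = []
--     for i in range(len(s) - 1):
--         if s[i] + s[i+1] == '()':
--             if seeds and seeds[-1][1] == i - 1:
--                 seeds[-1][1] = i+1
--             else:
--                 seeds.append([i,i+1])
--     return seeds
-- ===== SOURCE B (Python) =====
-- def findSeeds(s):
--     # Greedy run scanner: at each position, if a "()" pair starts there, consume the
--     # whole maximal run of consecutive "()" pairs at once and emit one [start, end]
--     # range, instead of A's per-index scan that merges each new pair into the last range.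
--     res = []
--     n = len(s)
--     i = 0
--     while i < n - 1:
--         if s[i] == '(' and s[i + 1] == ')':
--             start = i
--             while i < n - 1 and s[i] == '(' and s[i + 1] == ')':
--                 i += 2
--             res.append([start, i - 1])
--         else:
--             i += 1
--     return res
-- ===== Notes on version B (the rewrite author's own statement) =====
-- stated objective: alternative
-- what changed: Replaces A's per-index scan that appends a [i,i+1] range and then mutates the last range to merge each adjacent pair with a greedy run scanner that consumes a whole maximal run of consecutive '()' pairs at once and emits its [start,end] range in one step, with no merging or mutation of earlier output.
import Mathlib
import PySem

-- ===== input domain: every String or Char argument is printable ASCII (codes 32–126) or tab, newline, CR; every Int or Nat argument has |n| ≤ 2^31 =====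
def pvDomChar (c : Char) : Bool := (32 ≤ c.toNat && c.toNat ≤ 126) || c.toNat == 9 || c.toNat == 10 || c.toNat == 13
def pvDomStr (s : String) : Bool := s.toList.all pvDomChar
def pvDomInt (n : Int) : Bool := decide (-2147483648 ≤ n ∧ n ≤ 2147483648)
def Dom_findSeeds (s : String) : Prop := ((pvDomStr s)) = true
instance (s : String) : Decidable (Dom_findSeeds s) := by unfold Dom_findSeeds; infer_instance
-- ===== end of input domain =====

-- B replaces A's per-index scan (append a pair, then merge into the previous range
-- when adjacent) with a greedy scanner that consumes each maximal run of consecutive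
-- "()" pairs at once; objective: alternative (same cost, no merging/mutation of output).

-- ===== PORT A =====
-- loop body of A; s[i] + s[i+1] == '()' is checked as the two (always in-range inside
-- the loop) characters being '(' and ')'; seeds[-1] is total via getD [] (never taken
-- when seeds = [], guarded by the conjunction); seeds[-1][1] = i+1 is List.set 1.
def pvStepA (s : String) (seeds : List (List Int)) (i : Int) : List (List Int) :=
  if PySem.Str.pyGet? s i = some '(' ∧ PySem.Str.pyGet? s (i + 1) = some ')' then
    if seeds ≠ [] ∧
        PySem.List.pyGet? ((PySem.List.pyGet? seeds (-1)).getD []) 1 = some (i - 1) then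
      seeds.dropLast ++ [((PySem.List.pyGet? seeds (-1)).getD []).set 1 (i + 1)]
    else
      seeds ++ [[i, i + 1]]
  else
    seeds

def findSeeds (s : String) : List (List Int) :=
  (PySem.List.pyRange 0 (PySem.Str.len s - 1) 1).foldl (pvStepA s) []

-- ===== PORT B =====
-- inner while loop of B: how many characters the maximal run of "()" pairs starting
-- here covers (0 if no pair starts here)
def pvRunLen : List Char → Nat
  | '(' :: ')' :: rest => pvRunLen rest + 2
  | _ => 0

-- outer while loop of B over the remaining suffix, i = absolute index of its head
def pvScan : List Char → Int → List (List Int)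
  | [], _ => []
  | c :: rest, i =>
    if h : pvRunLen (c :: rest) = 0 then
      pvScan rest (i + 1)
    else
      [i, i + (pvRunLen (c :: rest) : Int) - 1]
        :: pvScan ((c :: rest).drop (pvRunLen (c :: rest))) (i + (pvRunLen (c :: rest) : Int))
termination_by cs => cs.length
decreasing_by
  · simp
  · simp only [List.length_drop, List.length_cons]; omega

def findSeeds_alt (s : String) : List (List Int) := pvScan s.toList 0

-- ===== PRECONDITION & SPEC =====
def Spec_findSeeds (s : String) (out : List (List Int)) : Prop := out = findSeeds_alt s
instance (s : String) (out : List (List Int)) : Decidable (Spec_findSeeds s out) := by unfold Spec_findSeeds; infer_instance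

-- ===== CLAIM (what is proved, stated in full; the proofs are below) =====
def Claim_equal_findSeeds : Prop := ∀ (s : String), Dom_findSeeds s → Spec_findSeeds s (findSeeds s)

-- ===== LEMMAS AND PROOFS =====

-- the run of m consecutive "()" pairs, as characters
def pvPairs : Nat → List Char
  | 0 => []
  | m + 1 => '(' :: ')' :: pvPairs m

lemma pvPairs_length (m : Nat) : (pvPairs m).length = 2 * m := by
  induction m with
  | zero => rfl
  | succ m ih => simp [pvPairs, ih]; omega

-- pvRunLen decomposes any list into a maximal run of pairs and a pair-free tail
lemma pvRunLen_structure (cs : List Char) :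
    ∃ m, pvRunLen cs = 2 * m ∧ cs = pvPairs m ++ cs.drop (2 * m) ∧
      pvRunLen (cs.drop (2 * m)) = 0 := by
  fun_induction pvRunLen cs with
  | case1 rest ih =>
    obtain ⟨m, h1, h2, h3⟩ := ih
    refine ⟨m + 1, by omega, ?_, ?_⟩
    · have : 2 * (m + 1) = 2 * m + 2 := by omega
      rw [this]
      simpa [pvPairs] using h2
    · have : 2 * (m + 1) = 2 * m + 2 := by omega
      rw [this]
      simpa using h3
  | case2 cs h =>
    have h0 : pvRunLen cs = 0 := by
      rw [pvRunLen.eq_def]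
      split
      · rename_i rest heq
        exact absurd rfl (h heq)
      · rfl
    exact ⟨0, by omega, by simp [pvPairs], by simpa using h0⟩

lemma pvPairs_last (m : Nat) (hm : 0 < m) : (pvPairs m)[2 * m - 1]? = some ')' := by
  induction m with
  | zero => omega
  | succ m ih =>
    rcases Nat.eq_zero_or_pos m with hm0 | hm0
    · subst hm0; rfl
    · have : 2 * (m + 1) - 1 = (2 * m - 1) + 2 := by omega
      rw [pvPairs, this]
      simpa using ih hm0

-- pvScan equations
lemma pvScan_nil (i : Int) : pvScan [] i = [] := by rw [pvScan]

lemma pvScan_cons_zero (c : Char) (rest : List Char) (i : Int)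
    (h : pvRunLen (c :: rest) = 0) : pvScan (c :: rest) i = pvScan rest (i + 1) := by
  rw [pvScan]; simp [h]

lemma pvScan_cons_pos (c : Char) (rest : List Char) (i : Int)
    (h : pvRunLen (c :: rest) ≠ 0) :
    pvScan (c :: rest) i =
      [i, i + (pvRunLen (c :: rest) : Int) - 1]
        :: pvScan ((c :: rest).drop (pvRunLen (c :: rest))) (i + (pvRunLen (c :: rest) : Int)) := by
  rw [pvScan]; simp [h]

-- pvStepA reductions
lemma pvStepA_nomatch (s : String) (acc : List (List Int)) (i : Int)
    (h : ¬ (PySem.Str.pyGet? s i = some '(' ∧ PySem.Str.pyGet? s (i + 1) = some ')')) :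
    pvStepA s acc i = acc := by
  unfold pvStepA; rw [if_neg h]

lemma pvStepA_append (s : String) (acc : List (List Int)) (i : Int)
    (h1 : PySem.Str.pyGet? s i = some '(') (h2 : PySem.Str.pyGet? s (i + 1) = some ')')
    (hacc : acc = [] ∨ ∃ pre a b, acc = pre ++ [[a, b]] ∧ b ≠ i - 1) :
    pvStepA s acc i = acc ++ [[i, i + 1]] := by
  unfold pvStepA
  rw [if_pos ⟨h1, h2⟩, if_neg]
  rcases hacc with h | ⟨pre, a, b, rfl, hb⟩
  · subst h; simp
  · rintro ⟨-, hlast⟩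
    rw [PySem.List.pyGet?_neg_one_append_singleton] at hlast
    simp only [Option.getD_some] at hlast
    have : PySem.List.pyGet? [a, b] 1 = some b := by
      simp [PySem.List.pyGet?, PySem.List.pyIdx?]
    rw [this] at hlast
    exact hb (Option.some.inj hlast)

lemma pvStepA_merge (s : String) (pre : List (List Int)) (a : Int) (i : Int)
    (h1 : PySem.Str.pyGet? s i = some '(') (h2 : PySem.Str.pyGet? s (i + 1) = some ')') :
    pvStepA s (pre ++ [[a, i - 1]]) i = pre ++ [[a, i + 1]] := by
  unfold pvStepA
  rw [if_pos ⟨h1, h2⟩, if_pos, PySem.List.pyGet?_neg_one_append_singleton]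
  · simp [List.set]
  · refine ⟨by simp, ?_⟩
    rw [PySem.List.pyGet?_neg_one_append_singleton]
    simp [PySem.List.pyGet?, PySem.List.pyIdx?]

-- cast helper: read Str.pyGet? at an Int index known to be the cast of a Nat
lemma pvStrGet (s : String) (j : Nat) (i : Int) (h : i = (j : Int)) :
    PySem.Str.pyGet? s i = s.toList[j]? := by
  subst h; exact PySem.Str.pyGet?_natCast s j

-- the tail of a run: positions j+1 (a ')'), then m further pairs from j+2, each merged
-- into the open range [a, …]
lemma pvTailFold (s : String) (m : Nat) : ∀ (j : Nat) (acc : List (List Int)) (a : Int),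
    s.toList[j + 1]? = some ')' →
    s.toList.drop (j + 2) = pvPairs m ++ s.toList.drop (j + 2 + 2 * m) →
    j + 2 + 2 * m ≤ s.toList.length →
    (PySem.List.pyRange ((j : Int) + 1) ((j : Int) + 2 * m + 1) 1).foldl (pvStepA s)
        (acc ++ [[a, (j : Int) + 1]])
      = acc ++ [[a, (j : Int) + 2 * m + 1]] := by
  induction m with
  | zero =>
    intro j acc a _ _ _
    rw [PySem.List.pyRange_one_eq_nil (by omega)]
    norm_num
  | succ m ih =>
    intro j acc a hj1 hdrop hle
    have hj2 : s.toList[j + 2]? = some '(' := by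
      have h0 : (s.toList.drop (j + 2))[0]? = s.toList[j + 2 + 0]? := List.getElem?_drop
      rw [hdrop] at h0
      simpa [pvPairs] using h0.symm
    have hj3 : s.toList[j + 3]? = some ')' := by
      have h0 : (s.toList.drop (j + 2))[1]? = s.toList[j + 2 + 1]? := List.getElem?_drop
      rw [hdrop] at h0
      have : j + 2 + 1 = j + 3 := by omega
      rw [this] at h0
      simpa [pvPairs] using h0.symm
    have hdrop' : s.toList.drop (j + 2 + 2) = pvPairs m ++ s.toList.drop (j + 2 + 2 + 2 * m) := by
      have h2 : s.toList.drop (j + 2 + 2) = List.drop 2 (s.toList.drop (j + 2)) := by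
        rw [List.drop_drop]
      rw [h2, hdrop]
      have : j + 2 + 2 * (m + 1) = j + 2 + 2 + 2 * m := by omega
      rw [this]
      simp [pvPairs]
    -- peel index j+1 (the ')' of the first pair): no-op
    rw [PySem.List.pyRange_one_cons (by omega), List.foldl_cons,
      pvStepA_nomatch _ _ _ (by
        rintro ⟨hcon, -⟩
        rw [pvStrGet s (j + 1) _ (by push_cast; ring), hj1] at hcon
        simp at hcon)]
    -- peel index j+2: merge the new pair into [a, …]
    rw [show (j : Int) + 1 + 1 = (j : Int) + 2 by ring,
      PySem.List.pyRange_one_cons (by omega), List.foldl_cons]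
    have hmerge : pvStepA s (acc ++ [[a, (j : Int) + 1]]) ((j : Int) + 2)
        = acc ++ [[a, (j : Int) + 3]] := by
      have h1 : PySem.Str.pyGet? s ((j : Int) + 2) = some '(' := by
        rw [pvStrGet s (j + 2) _ (by push_cast; ring)]; exact hj2
      have h2 : PySem.Str.pyGet? s ((j : Int) + 2 + 1) = some ')' := by
        rw [pvStrGet s (j + 3) _ (by push_cast; ring)]; exact hj3
      have := pvStepA_merge s acc a ((j : Int) + 2) h1 h2
      rw [show (j : Int) + 2 - 1 = (j : Int) + 1 by ring,
        show (j : Int) + 2 + 1 = (j : Int) + 3 by ring] at this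
      exact this
    rw [hmerge]
    -- remaining indices are pvTailFold at j+2 with m pairs
    have := ih (j + 2) acc a (by
        have : j + 2 + 1 = j + 3 := by omega
        rw [this]; exact hj3) hdrop' (by omega)
    push_cast at this ⊢
    rw [show (j : Int) + 2 + 1 = (j : Int) + 3 by ring,
      show (j : Int) + 2 + 2 * (m : Int) + 1 = (j : Int) + 2 * ((m : Int) + 1) + 1 by ring] at this
    exact this

-- one whole run: m ≥ 1 pairs starting at j, scanned by indices j … j+2m-2, produce the
-- single appended range [j, j+2m-1]
lemma pvRunFold (s : String) (m : Nat) (hm : 0 < m) (j : Nat) (acc : List (List Int))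
    (hpre : s.toList.drop j = pvPairs m ++ s.toList.drop (j + 2 * m))
    (hle : j + 2 * m ≤ s.toList.length)
    (hacc : acc = [] ∨ ∃ pre a b, acc = pre ++ [[a, b]] ∧ b ≤ (j : Int) - 2) :
    (PySem.List.pyRange (j : Int) ((j : Int) + 2 * m - 1) 1).foldl (pvStepA s) acc
      = acc ++ [[(j : Int), (j : Int) + 2 * m - 1]] := by
  obtain ⟨m', rfl⟩ : ∃ m', m = m' + 1 := ⟨m - 1, by omega⟩
  have hj0 : s.toList[j]? = some '(' := by
    have h0 : (s.toList.drop j)[0]? = s.toList[j + 0]? := List.getElem?_drop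
    rw [hpre] at h0
    simpa [pvPairs] using h0.symm
  have hj1 : s.toList[j + 1]? = some ')' := by
    have h0 : (s.toList.drop j)[1]? = s.toList[j + 1]? := List.getElem?_drop
    rw [hpre] at h0
    simpa [pvPairs] using h0.symm
  have hdrop' : s.toList.drop (j + 2) = pvPairs m' ++ s.toList.drop (j + 2 + 2 * m') := by
    have h2 : s.toList.drop (j + 2) = List.drop 2 (s.toList.drop j) := by
      rw [List.drop_drop]
    rw [h2, hpre]
    have : j + 2 * (m' + 1) = j + 2 + 2 * m' := by omega
    rw [this]
    simp [pvPairs]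
  -- the first index j appends the fresh range [j, j+1]
  rw [PySem.List.pyRange_one_cons (by push_cast; omega), List.foldl_cons]
  have h1 : PySem.Str.pyGet? s (j : Int) = some '(' := by
    rw [pvStrGet s j _ rfl]; exact hj0
  have h2 : PySem.Str.pyGet? s ((j : Int) + 1) = some ')' := by
    rw [pvStrGet s (j + 1) _ (by push_cast; ring)]; exact hj1
  rw [pvStepA_append s acc (j : Int) h1 h2 (by
      rcases hacc with h | ⟨pre, a, b, rfl, hb⟩
      · exact Or.inl h
      · exact Or.inr ⟨pre, a, b, rfl, by omega⟩)]
  -- the remaining indices merge the other m' pairs into it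
  have := pvTailFold s m' j acc ((j : Int)) hj1 hdrop' (by omega)
  push_cast at this ⊢
  rw [show (j : Int) + 2 * ((m' : Int) + 1) - 1 = (j : Int) + 2 * (m' : Int) + 1 by ring]
  exact this

-- main loop correspondence, by fuel on the remaining length
lemma pvMain (s : String) (fuel : Nat) : ∀ (j : Nat) (acc : List (List Int)),
    s.toList.length - j ≤ fuel →
    (acc = [] ∨ ∃ pre a b, acc = pre ++ [[a, b]] ∧
      (b ≤ (j : Int) - 2 ∨ (b = (j : Int) - 1 ∧ pvRunLen (s.toList.drop j) = 0))) →
    (PySem.List.pyRange (j : Int) ((s.toList.length : Int) - 1) 1).foldl (pvStepA s) acc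
      = acc ++ pvScan (s.toList.drop j) (j : Int) := by
  induction fuel with
  | zero =>
    intro j acc hf _
    rw [PySem.List.pyRange_one_eq_nil (by omega), List.drop_eq_nil_of_le (by omega)]
    simp [pvScan_nil]
  | succ f ih =>
    intro j acc hf hinv
    by_cases hjn : s.toList.length ≤ j
    · rw [PySem.List.pyRange_one_eq_nil (by omega), List.drop_eq_nil_of_le hjn]
      simp [pvScan_nil]
    replace hjn : j < s.toList.length := by omega
    obtain ⟨c, rest, hcs⟩ : ∃ c rest, s.toList.drop j = c :: rest := by
      cases hd : s.toList.drop j with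
      | nil => exact absurd (List.drop_eq_nil_iff.mp hd) (by omega)
      | cons c rest => exact ⟨c, rest, rfl⟩
    have hdj1 : s.toList.drop (j + 1) = rest := by
      have h1 : s.toList.drop (j + 1) = List.drop 1 (s.toList.drop j) := by
        rw [List.drop_drop]
      rw [h1, hcs]; rfl
    by_cases hk : pvRunLen (s.toList.drop j) = 0
    · -- no pair starts at j: the step is a no-op, B skips one character
      have hnom : ¬ (PySem.Str.pyGet? s (j : Int) = some '(' ∧
          PySem.Str.pyGet? s ((j : Int) + 1) = some ')') := by
        rintro ⟨ha, hb⟩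
        rw [pvStrGet s j _ rfl] at ha
        rw [pvStrGet s (j + 1) _ (by push_cast; ring)] at hb
        have e0 : s.toList[j]? = some c := by
          have h0 : (s.toList.drop j)[0]? = s.toList[j + 0]? := List.getElem?_drop
          rw [hcs] at h0; simpa using h0.symm
        have e1 : s.toList[j + 1]? = rest[0]? := by
          have h0 : (s.toList.drop j)[1]? = s.toList[j + 1]? := List.getElem?_drop
          rw [hcs] at h0; simpa using h0.symm
        obtain rfl : c = '(' := Option.some.inj (e0.symm.trans ha)
        rw [e1] at hb
        cases rest with
        | nil => simp at hb
        | cons d rest' =>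
          obtain rfl : d = ')' := by simpa using hb
          rw [hcs] at hk
          simp [pvRunLen] at hk
      by_cases hlast : j + 1 < s.toList.length
      · rw [PySem.List.pyRange_one_cons (by omega), List.foldl_cons,
          pvStepA_nomatch _ _ _ hnom]
        have hinv' : acc = [] ∨ ∃ pre a b, acc = pre ++ [[a, b]] ∧
            (b ≤ ((j + 1 : Nat) : Int) - 2 ∨
              (b = ((j + 1 : Nat) : Int) - 1 ∧ pvRunLen (s.toList.drop (j + 1)) = 0)) := by
          rcases hinv with h | ⟨pre, a, b, rfl, hb⟩
          · exact Or.inl h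
          · refine Or.inr ⟨pre, a, b, rfl, Or.inl ?_⟩
            rcases hb with h | ⟨h, h'⟩ <;> push_cast <;> omega
        have := ih (j + 1) acc (by omega) hinv'
        rw [show (j : Int) + 1 = ((j + 1 : Nat) : Int) by push_cast; ring, this, hdj1,
          hcs, pvScan_cons_zero c rest _ (hcs ▸ hk)]
        push_cast; ring_nf
      · -- j is the last index: the loop range is empty and B scans past the lone char
        have hrest : rest = [] := by
          have hlen := congrArg List.length hcs
          simp only [List.length_drop, List.length_cons] at hlen
          have : rest.length = 0 := by omega
          exact List.length_eq_zero_iff.mp this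
        rw [PySem.List.pyRange_one_eq_nil (by omega), List.foldl_nil, hcs, hrest,
          pvScan_cons_zero c [] _ (by rw [← hrest, ← hcs]; exact hk), pvScan_nil]
        simp
    · -- a maximal run of pairs starts at j
      obtain ⟨m, hm1, hm2, hm3⟩ := pvRunLen_structure (s.toList.drop j)
      rw [List.drop_drop] at hm2 hm3
      have hm0 : 0 < m := by omega
      have hlen : j + 2 * m ≤ s.toList.length := by
        have := congrArg List.length hm2
        simp only [List.length_drop, List.length_append, pvPairs_length] at this
        omega
      have haccok : acc = [] ∨ ∃ pre a b, acc = pre ++ [[a, b]] ∧ b ≤ (j : Int) - 2 := by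
        rcases hinv with h | ⟨pre, a, b, rfl, hb⟩
        · exact Or.inl h
        · refine Or.inr ⟨pre, a, b, rfl, ?_⟩
          rcases hb with h | ⟨-, h'⟩
          · exact h
          · exact absurd h' hk
      rw [PySem.List.pyRange_one_append (j : Int) ((j : Int) + 2 * m - 1)
          ((s.toList.length : Int) - 1) (by omega) (by omega), List.foldl_append,
        pvRunFold s m hm0 j acc hm2 hlen haccok]
      have hkm : pvRunLen (c :: rest) = 2 * m := by rw [← hcs]; exact hm1
      rw [hcs, pvScan_cons_pos c rest _ (by rw [hkm]; omega), hkm, ← hcs, List.drop_drop]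
      by_cases hend : j + 2 * m = s.toList.length
      · rw [PySem.List.pyRange_one_eq_nil (by omega), List.foldl_nil,
          List.drop_eq_nil_of_le (by omega), pvScan_nil]
        push_cast; simp
      · have hlt : j + 2 * m < s.toList.length := lt_of_le_of_ne hlen hend
        have hnom2 : ¬ (PySem.Str.pyGet? s ((j : Int) + 2 * m - 1) = some '(' ∧
            PySem.Str.pyGet? s ((j : Int) + 2 * m - 1 + 1) = some ')') := by
          rintro ⟨ha, -⟩
          have e : s.toList[j + 2 * m - 1]? = some ')' := by
            have h0 : (s.toList.drop j)[2 * m - 1]? = s.toList[j + (2 * m - 1)]? :=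
              List.getElem?_drop
            rw [hm2, List.getElem?_append_left (by rw [pvPairs_length]; omega),
              pvPairs_last m hm0] at h0
            rw [show j + 2 * m - 1 = j + (2 * m - 1) by omega]
            exact h0.symm
          rw [pvStrGet s (j + 2 * m - 1) _ (by omega), e] at ha
          simp at ha
        rw [PySem.List.pyRange_one_cons (by omega), List.foldl_cons,
          pvStepA_nomatch _ _ _ hnom2]
        have hinv2 : acc ++ [[(j : Int), (j : Int) + 2 * m - 1]] = [] ∨
            ∃ pre a b, acc ++ [[(j : Int), (j : Int) + 2 * m - 1]] = pre ++ [[a, b]] ∧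
              (b ≤ ((j + 2 * m : Nat) : Int) - 2 ∨
                (b = ((j + 2 * m : Nat) : Int) - 1 ∧
                  pvRunLen (s.toList.drop (j + 2 * m)) = 0)) := by
          exact Or.inr ⟨acc, (j : Int), (j : Int) + 2 * m - 1, rfl,
            Or.inr ⟨by push_cast; ring, hm3⟩⟩
        have := ih (j + 2 * m) (acc ++ [[(j : Int), (j : Int) + 2 * m - 1]]) (by omega) hinv2
        rw [show (j : Int) + 2 * m - 1 + 1 = ((j + 2 * m : Nat) : Int) by push_cast; ring,
          this]
        push_cast; simp [List.append_assoc]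

-- ===== VERDICT (by name: the statement is the Claim_ definition above) =====
theorem findSeeds_spec : Claim_equal_findSeeds := by
  intro s _
  unfold Spec_findSeeds findSeeds findSeeds_alt
  have h := pvMain s s.toList.length 0 [] (by omega) (Or.inl rfl)
  simpa using h
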